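-- pv_equiv track=rewrite | github.com/sonnylaskar/Competitions | Kaggle/Avito Duplicate Ad Detection/code/3_feature_set4d_similarity_clean.py | count_2words
-- ===== SOURCE A (Python) =====
-- def count_2words(words, text):
--         # To count how many times of the search terms having two words at least showing in texts.
--     count2 = 0
--     if len(words) < 2 or len(text) < 2:
--         return -1
--     else:
--         for m in range(0, len(words) - 1):
--             words1 = words[m]
--             for n in range(m + 1, len(words)):
--                 words2 = words[n]
--                 if words1 in text and words2 in text:
--                     count2 += 1
--         return count2
-- ===== SOURCE B (Python) =====
-- def count_2words(words, text):
--     # Count each word's presence once: the number of index-pairs (m < n) with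
--     # both words in text is C(p, 2) where p = number of present words.
--     if len(words) < 2 or len(text) < 2:
--         return -1
--     p = sum(1 for w in words if w in text)
--     return p * (p - 1) // 2
-- ===== Notes on version B (the rewrite author's own statement) =====
-- stated objective: faster
-- what changed: Replaces the O(k^2) nested loop over index pairs with one presence pass (p = number of words occurring in text) and the closed form p*(p-1)//2.
import Mathlib
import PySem

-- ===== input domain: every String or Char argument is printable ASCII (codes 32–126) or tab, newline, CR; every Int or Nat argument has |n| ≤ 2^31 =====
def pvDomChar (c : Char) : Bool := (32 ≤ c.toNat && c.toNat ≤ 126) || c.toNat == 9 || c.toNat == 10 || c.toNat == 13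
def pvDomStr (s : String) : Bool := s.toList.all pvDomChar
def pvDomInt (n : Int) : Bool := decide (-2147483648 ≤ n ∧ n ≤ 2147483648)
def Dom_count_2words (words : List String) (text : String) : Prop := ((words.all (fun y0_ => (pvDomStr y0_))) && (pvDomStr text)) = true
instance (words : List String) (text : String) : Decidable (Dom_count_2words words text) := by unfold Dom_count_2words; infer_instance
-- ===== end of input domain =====

-- B replaces A's O(k^2) pair loop by one presence pass and the closed form p*(p-1)//2 (faster, asymptotic).


-- ===== PORT A =====
def count_2words (words : List String) (text : String) : Int :=
  if words.length < 2 ∨ PySem.Str.len text < 2 then -1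
  else
    (PySem.List.pyRange 0 ((words.length : Int) - 1) 1).foldl (fun count2 m =>
      let words1 := PySem.List.pyGetD words m ""
      (PySem.List.pyRange (m + 1) (words.length : Int) 1).foldl (fun count2 n =>
        let words2 := PySem.List.pyGetD words n ""
        if (PySem.Str.isIn words1 text && PySem.Str.isIn words2 text) = true then count2 + 1 else count2)
        count2) 0

-- ===== PORT B =====
def count_2words_alt (words : List String) (text : String) : Int :=
  if words.length < 2 ∨ PySem.Str.len text < 2 then -1
  else
    let p : Int := (words.countP (fun w => PySem.Str.isIn w text) : Int)
    PySem.Int.floordiv (p * (p - 1)) 2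

-- ===== PRECONDITION & SPEC =====
def Spec_count_2words (words : List String) (text : String) (out : Int) : Prop := out = count_2words_alt words text
instance (words : List String) (text : String) (out : Int) : Decidable (Spec_count_2words words text out) := by unfold Spec_count_2words; infer_instance

-- ===== CLAIM (what is proved, stated in full; the proofs are below) =====
def Claim_equal_count_2words : Prop := ∀ (words : List String) (text : String), Dom_count_2words words text → Spec_count_2words words text (count_2words words text)

-- ===== LEMMAS AND PROOFS =====

-- Number of pairs m < n with both positions satisfying q, structurally.
def pvPairCount (q : String → Bool) : List String → Int
  | [] => 0
  | w :: t => (if q w then ((t.countP q : Int)) else 0) + pvPairCount q t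

-- the per-outer-index contribution of A's loop
def pvTerm (q : String → Bool) (ws : List String) (k : Nat) : Int :=
  if q (ws.getD k "") then ((ws.drop (k + 1)).countP q : Int) else 0

lemma pvFront (q : String → Bool) :
    ∀ (ws : List String) (c : Int),
      (List.range ws.length).foldl (fun acc k => acc + pvTerm q ws k) c = c + pvPairCount q ws := by
  intro ws
  induction ws with
  | nil => intro c; simp [pvPairCount]
  | cons w t ih =>
    intro c
    have h : (w :: t).length = t.length + 1 := rfl
    rw [h, List.range_succ_eq_map, List.foldl_cons, List.foldl_map]
    have hb : ∀ k, pvTerm q (w :: t) (k + 1) = pvTerm q t k := by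
      intro k; simp [pvTerm]
    simp only [hb, ih]
    simp [pvTerm, pvPairCount]
    ring

lemma pvTwoMul (q : String → Bool) (ws : List String) :
    2 * pvPairCount q ws = (ws.countP q : Int) * ((ws.countP q : Int) - 1) := by
  induction ws with
  | nil => simp [pvPairCount]
  | cons w t ih =>
    rcases Bool.eq_false_or_eq_true (q w) with hq | hq <;>
      simp only [pvPairCount, List.countP_cons, hq, if_true] <;>
      push_cast <;> linear_combination ih

lemma pvTerm_last (q : String → Bool) (ws : List String) (h : 1 ≤ ws.length) :
    pvTerm q ws (ws.length - 1) = 0 := by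
  have : ws.drop (ws.length - 1 + 1) = [] := by
    apply List.drop_eq_nil_of_le; omega
  simp [pvTerm, this]

theorem count_2words_spec : Claim_equal_count_2words := by
  intro words text _
  unfold Spec_count_2words count_2words count_2words_alt
  by_cases hg : words.length < 2 ∨ PySem.Str.len text < 2
  · rw [if_pos hg, if_pos hg]
  · rw [if_neg hg, if_neg hg]
    have hL : 2 ≤ words.length := by
      rcases Nat.lt_or_ge words.length 2 with h | h
      · exact absurd (Or.inl h) hg
      · exact h
    have hcong : ∀ (acc : Int), ∀ m ∈ PySem.List.pyRange 0 ((words.length : Int) - 1) 1,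
        (PySem.List.pyRange (m + 1) (words.length : Int) 1).foldl (fun count2 n =>
          if (PySem.Str.isIn (PySem.List.pyGetD words m "") text
              && PySem.Str.isIn (PySem.List.pyGetD words n "") text) = true
          then count2 + 1 else count2) acc
        = acc + pvTerm (fun w => PySem.Str.isIn w text) words m.toNat := by
      intro acc m hm
      obtain ⟨h0, hlt⟩ := (PySem.List.mem_pyRange_one).1 hm
      rw [PySem.List.foldl_pyRange_pyGetD' words ""
        (fun count2 w2 => if (PySem.Str.isIn (PySem.List.pyGetD words m "") text
            && PySem.Str.isIn w2 text) = true then count2 + 1 else count2) acc (by omega)]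
      rw [PySem.List.foldl_if_add_one]
      obtain ⟨k, rfl⟩ := Int.eq_ofNat_of_zero_le h0
      have h1 : ((k : Int) + 1).toNat = k + 1 := by omega
      rw [PySem.List.pyGetD_natCast, h1]
      unfold pvTerm
      rcases Bool.eq_false_or_eq_true (PySem.Str.isIn (words.getD k "") text) with hw | hw <;>
        simp only [PySem.Str.isIn_eq, List.getD] at hw <;> simp [hw]
    rw [PySem.List.foldl_congr_mem _ _ _ _ hcong]
    rw [PySem.List.pyRange_one, List.foldl_map]
    have hcut : (((words.length : Int)) - 1 - 0).toNat = words.length - 1 := by omega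
    rw [hcut]
    have hcong2 : ∀ (acc : Int), ∀ k ∈ List.range (words.length - 1),
        acc + pvTerm (fun w => PySem.Str.isIn w text) words ((0 : Int) + (k : Int)).toNat
        = acc + pvTerm (fun w => PySem.Str.isIn w text) words k := by
      intro acc k _
      have : ((0 : Int) + (k : Int)).toNat = k := by omega
      rw [this]
    rw [PySem.List.foldl_congr_mem _ _ _ _ hcong2]
    have hext : (List.range words.length).foldl
          (fun acc k => acc + pvTerm (fun w => PySem.Str.isIn w text) words k) 0
        = (List.range (words.length - 1)).foldl
          (fun acc k => acc + pvTerm (fun w => PySem.Str.isIn w text) words k) 0 := by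
      have hsplit : List.range words.length = List.range (words.length - 1) ++ [words.length - 1] := by
        have h : words.length = (words.length - 1) + 1 := by omega
        conv_lhs => rw [h, List.range_succ]
      rw [hsplit, List.foldl_append, List.foldl_cons, List.foldl_nil,
        pvTerm_last _ words (by omega), add_zero]
    rw [← hext, pvFront, zero_add]
    rw [PySem.Int.floordiv_eq_ediv_of_pos (by norm_num), ← pvTwoMul _ words,
      Int.mul_ediv_cancel_left _ (by norm_num)]
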